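-- pv_equiv track=rewrite | github.com/Ade-Adeleke/RaydaHelpdesk | src/helpdesk/core/response_generator.py | _clean_response_formatting
-- ===== SOURCE A (Python) =====
-- def _clean_response_formatting(response: str) -> str:
--     """Clean up response formatting for better readability"""
--     if not response:
--         return ""
--
--     # Handle literal \n strings that might appear in the response
--     response = response.replace('\\n', '\n')
--
--     # Remove excessive markdown formatting
--     response = response.replace('**', '')
--     response = response.replace('##', '')
--     response = response.replace('###', '')
--     response = response.replace('*', '')  # Remove single asterisks too
--
--     # Clean up line breaks and spacing
--     lines = response.split('\n')
--     cleaned_lines = []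
--
--     for line in lines:
--         line = line.strip()
--         if line:  # Only add non-empty lines
--             cleaned_lines.append(line)
--         elif cleaned_lines and cleaned_lines[-1]:  # Add empty line only if previous line wasn't empty
--             cleaned_lines.append('')
--
--     # Join lines and ensure proper paragraph spacing
--     cleaned_response = '\n'.join(cleaned_lines)
--
--     # Remove multiple consecutive empty lines
--     while '\n\n\n' in cleaned_response:
--         cleaned_response = cleaned_response.replace('\n\n\n', '\n\n')
--
--     # Handle any remaining literal newline strings
--     cleaned_response = cleaned_response.replace('\\n', '\n')
--
--     return cleaned_response.strip()
-- ===== SOURCE B (Python) =====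
-- def _clean_response_formatting(response: str) -> str:
--     """Clean up response formatting for better readability"""
--     if not response:
--         return ""
--
--     # Same normalisation steps as before
--     response = response.replace('\\n', '\n')
--     for token in ('**', '##', '###', '*'):
--         response = response.replace(token, '')
--
--     # Strip every line, then keep a line iff it is non-empty or the
--     # previous (stripped) line was non-empty — a stateless zip filter
--     # instead of a loop consulting the output built so far.
--     lines = [line.strip() for line in response.split('\n')]
--     kept = [line for prev, line in zip([''] + lines, lines) if line or prev]
--
--     cleaned = '\n'.join(kept)
--
--     # Handle any remaining literal newline strings
--     cleaned = cleaned.replace('\\n', '\n')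
--
--     return cleaned.strip()
-- ===== Notes on version B (the rewrite author's own statement) =====
-- stated objective: simpler
-- what changed: A's stateful line loop (which consults the last element of the output built so far) plus a while-loop collapsing triple newlines is replaced by a stateless zip-with-previous comprehension filter over the stripped lines; the while-loop is dropped because the kept lines can never produce a triple newline.
import Mathlib
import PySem

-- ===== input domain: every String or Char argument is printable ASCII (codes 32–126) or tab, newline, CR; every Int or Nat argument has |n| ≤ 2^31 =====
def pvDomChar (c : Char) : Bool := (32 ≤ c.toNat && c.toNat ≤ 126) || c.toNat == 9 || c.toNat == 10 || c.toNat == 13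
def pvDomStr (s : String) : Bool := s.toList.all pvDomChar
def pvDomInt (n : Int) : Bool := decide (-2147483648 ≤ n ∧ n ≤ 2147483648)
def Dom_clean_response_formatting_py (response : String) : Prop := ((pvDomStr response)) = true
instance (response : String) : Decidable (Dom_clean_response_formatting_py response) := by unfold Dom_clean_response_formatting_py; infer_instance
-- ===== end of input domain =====

-- B replaces A's stateful line loop (guarded by the output's last element) and the dead
-- triple-newline while-loop by a stateless zip-with-previous filter; same return value.

-- ===== PORT A =====
-- A's loop body (cleaned_lines accumulator), kept as a named helper
def pvStepA (acc : List String) (line : String) : List String :=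
  let l := PySem.Str.strip line
  if l ≠ "" then acc ++ [l]
  else if acc ≠ [] ∧ (PySem.List.pyGet? acc (-1)).getD "" ≠ "" then acc ++ [""]
  else acc

-- the `while '\n\n\n' in cleaned_response` loop, with a fuel bound (one replace shortens
-- the string, so `len + 1` rounds always suffice; the guard is checked each round as in Python)
def pvWhileA (fuel : Nat) (s : String) : String :=
  match fuel with
  | 0 => s
  | f + 1 =>
      if PySem.Str.isIn "\n\n\n" s then pvWhileA f (PySem.Str.replace s "\n\n\n" "\n\n")
      else s

def clean_response_formatting_py (response : String) : String :=
  if response = "" then ""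
  else
    let r1 := PySem.Str.replace response "\\n" "\n"
    let r2 := PySem.Str.replace r1 "**" ""
    let r3 := PySem.Str.replace r2 "##" ""
    let r4 := PySem.Str.replace r3 "###" ""
    let r5 := PySem.Str.replace r4 "*" ""
    let lines := (PySem.Str.split? r5 "\n").getD []
    let cleaned := lines.foldl pvStepA []
    let joined := PySem.Str.join "\n" cleaned
    let collapsed := pvWhileA (joined.toList.length + 1) joined
    let final := PySem.Str.replace collapsed "\\n" "\n"
    PySem.Str.strip final

-- ===== PORT B =====
def clean_response_formatting_py_alt (response : String) : String :=
  if response = "" then ""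
  else
    let r := ["**", "##", "###", "*"].foldl (fun acc t => PySem.Str.replace acc t "")
               (PySem.Str.replace response "\\n" "\n")
    let lines := ((PySem.Str.split? r "\n").getD []).map PySem.Str.strip
    let kept := ((("" :: lines).zip lines).filter (fun p => p.2 != "" || p.1 != "")).map Prod.snd
    let cleaned := PySem.Str.join "\n" kept
    PySem.Str.strip (PySem.Str.replace cleaned "\\n" "\n")

-- ===== PRECONDITION & SPEC =====
def Spec_clean_response_formatting_py (response : String) (out : String) : Prop := out = clean_response_formatting_py_alt response
instance (response : String) (out : String) : Decidable (Spec_clean_response_formatting_py response out) := by unfold Spec_clean_response_formatting_py; infer_instance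

-- ===== CLAIM (what is proved, stated in full; the proofs are below) =====
def Claim_equal_clean_response_formatting_py : Prop := ∀ (response : String), Dom_clean_response_formatting_py response → Spec_clean_response_formatting_py response (clean_response_formatting_py response)

-- ===== LEMMAS AND PROOFS =====

-- canonical form of the kept lines: keep a line iff it or its predecessor is non-blank
def pvKeep (prev : String) : List String → List String
  | [] => []
  | l :: ls => (if l != "" || prev != "" then [l] else []) ++ pvKeep l ls

theorem pv_zip_eq (M : List String) (prev : String) :
    (((prev :: M).zip M).filter (fun p => p.2 != "" || p.1 != "")).map Prod.snd
      = pvKeep prev M := by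
  induction M generalizing prev with
  | nil => simp [pvKeep]
  | cons l ls ih =>
      by_cases h : (l != "" || prev != "") = true <;>
        simp [pvKeep, List.zip_cons_cons, h, ih]

theorem pv_fold_eq (L : List String) (acc : List String) (prev : String)
    (hinv : prev ≠ "" ↔ (acc ≠ [] ∧ (PySem.List.pyGet? acc (-1)).getD "" ≠ "")) :
    L.foldl pvStepA acc = acc ++ pvKeep prev (L.map PySem.Str.strip) := by
  induction L generalizing acc prev with
  | nil => simp [pvKeep]
  | cons l ls ih =>
      by_cases hs : PySem.Str.strip l = ""
      · by_cases hp : prev = ""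
        · subst hp
          have hc : ¬ (acc ≠ [] ∧ (PySem.List.pyGet? acc (-1)).getD "" ≠ "") := by
            intro hcond; exact (hinv.mpr hcond) rfl
          have hstep : pvStepA acc l = acc := by simp [pvStepA, hs, hc]
          simp only [List.foldl_cons, hstep, List.map_cons, pvKeep, hs]
          simpa using ih acc "" hinv
        · have hc : acc ≠ [] ∧ (PySem.List.pyGet? acc (-1)).getD "" ≠ "" := hinv.mp hp
          have hstep : pvStepA acc l = acc ++ [""] := by simp [pvStepA, hs, hc]
          have hinv' : ("" : String) ≠ "" ↔
              (acc ++ [""] ≠ [] ∧ (PySem.List.pyGet? (acc ++ [""]) (-1)).getD "" ≠ "") := by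
            simp
          simp only [List.foldl_cons, hstep, List.map_cons, pvKeep, hs]
          rw [ih (acc ++ [""]) "" hinv']
          simp [hp]
      · have hstep : pvStepA acc l = acc ++ [PySem.Str.strip l] := by simp [pvStepA, hs]
        have hinv' : PySem.Str.strip l ≠ "" ↔
            (acc ++ [PySem.Str.strip l] ≠ [] ∧
              (PySem.List.pyGet? (acc ++ [PySem.Str.strip l]) (-1)).getD "" ≠ "") := by
          simp [hs]
        simp only [List.foldl_cons, hstep, List.map_cons, pvKeep]
        rw [ih (acc ++ [PySem.Str.strip l]) (PySem.Str.strip l) hinv']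
        simp [hs]

theorem pv_keep_head (M : List String) : (pvKeep "" M).head? ≠ some "" := by
  induction M with
  | nil => simp [pvKeep]
  | cons l ls ih =>
      by_cases h : l = ""
      · simpa [pvKeep, h] using ih
      · simp [pvKeep, h]

theorem pv_keep_chain (M : List String) (prev : String) :
    List.IsChain (fun a b => ¬(a = "" ∧ b = "")) (pvKeep prev M) := by
  induction M generalizing prev with
  | nil => simp [pvKeep]
  | cons l ls ih =>
      by_cases hl : l = ""
      · by_cases hp : prev = ""
        · simpa [pvKeep, hl, hp] using ih ""
        · have hh := pv_keep_head ls
          have hcond : (prev != "") = true := by simp [hp]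
          subst hl
          simp only [pvKeep, bne_self_eq_false, Bool.false_or, hcond, if_true,
            List.singleton_append, List.isChain_cons]
          refine ⟨?_, ih ""⟩
          intro y hy hcon
          exact hh (by rw [hy, hcon.2])
      · have hcond : (l != "" || prev != "") = true := by simp [hl]
        simp only [pvKeep, hcond, if_true, List.singleton_append, List.isChain_cons]
        exact ⟨fun y _ hcon => hl hcon.1, ih l⟩

theorem pv_keep_mem (M : List String) (prev x : String) (hx : x ∈ pvKeep prev M) :
    x = "" ∨ x ∈ M := by
  induction M generalizing prev with
  | nil => simp [pvKeep] at hx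
  | cons l ls ih =>
      simp only [pvKeep] at hx
      rcases List.mem_append.mp hx with h | h
      · split at h
        · simp at h; right; simp [h]
        · simp at h
      · rcases ih l h with h' | h'
        · exact Or.inl h'
        · exact Or.inr (List.mem_cons_of_mem _ h')

-- window scan: no three consecutive newline characters
def pvNoTriple : List Char → Bool
  | a :: b :: c :: rest => (!(a == '\n' && b == '\n' && c == '\n')) && pvNoTriple (b :: c :: rest)
  | _ => true

theorem pv_nt_cons1 (a : Char) (cs : List Char) (h : a ≠ '\n') :
    pvNoTriple (a :: cs) = pvNoTriple cs := by
  match cs with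
  | [] => rfl
  | [b] => rfl
  | b :: c :: rest => simp [pvNoTriple, h]

theorem pv_nt_cons2 (a b : Char) (cs : List Char) (h : b ≠ '\n') :
    pvNoTriple (a :: b :: cs) = pvNoTriple (b :: cs) := by
  match cs with
  | [] => rfl
  | c :: rest => simp [pvNoTriple, h]

theorem pv_nt_tail (a : Char) (cs : List Char) (h : pvNoTriple (a :: cs) = true) :
    pvNoTriple cs = true := by
  match cs with
  | [] => rfl
  | [b] => rfl
  | b :: c :: rest =>
      simp only [pvNoTriple, Bool.and_eq_true] at h
      exact h.2

theorem pv_nt_append (u v : List Char) (h : '\n' ∉ u) :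
    pvNoTriple (u ++ v) = pvNoTriple v := by
  induction u with
  | nil => rfl
  | cons a u' ih =>
      have ha : a ≠ '\n' := fun hc => h (hc ▸ List.mem_cons_self)
      rw [List.cons_append, pv_nt_cons1 a _ ha, ih (fun hc => h (List.mem_cons_of_mem _ hc))]

theorem pv_nt_no_infix (cs : List Char) (h : pvNoTriple cs = true) :
    ¬ (['\n', '\n', '\n'] <:+: cs) := by
  induction cs with
  | nil => intro hc; simp at hc
  | cons a cs' ih =>
      intro hc
      rcases List.infix_cons_iff.mp hc with hp | hi
      · obtain ⟨t, ht⟩ := hp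
        injection ht with h1 h2
        subst h1
        rw [show ['\n', '\n'].append t = '\n' :: '\n' :: t from rfl] at h2
        subst h2
        simp [pvNoTriple] at h
      · exact ih (pv_nt_tail _ _ h) hi

theorem pv_nt_free (u : List Char) (h : '\n' ∉ u) : pvNoTriple u = true := by
  have h2 := pv_nt_append u [] h
  rw [List.append_nil] at h2
  rw [h2]; rfl

theorem pv_nt_nl (u : List Char) (h : '\n' ∉ u) : pvNoTriple ('\n' :: u) = true := by
  cases u with
  | nil => rfl
  | cons c u' =>
      have hc : c ≠ '\n' := fun hcc => h (hcc ▸ List.mem_cons_self)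
      rw [pv_nt_cons2 _ _ _ hc]
      exact pv_nt_free _ h

theorem pv_nt_join (K : List String) (hfree : ∀ x ∈ K, '\n' ∉ x.toList)
    (hch : List.IsChain (fun a b => ¬(a = "" ∧ b = "")) K) :
    pvNoTriple ('\n' :: PySem.Chars.join ['\n'] (K.map String.toList)) = true ∧
      (K.head? ≠ some "" →
        pvNoTriple ('\n' :: '\n' :: PySem.Chars.join ['\n'] (K.map String.toList)) = true) := by
  induction K with
  | nil => exact ⟨rfl, fun _ => rfl⟩
  | cons x K' ih =>
      have hxfree : '\n' ∉ x.toList := hfree x List.mem_cons_self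
      have hpair := List.isChain_cons.mp hch
      have ihh := ih (fun y hy => hfree y (List.mem_cons_of_mem _ hy)) hpair.2
      -- the joined tail after x
      have hhead : x = "" → K' ≠ [] → K'.head? ≠ some "" := by
        intro hx hne heq
        cases K' with
        | nil => exact hne rfl
        | cons y K'' =>
            have hy : y = "" := by simpa using heq
            exact hpair.1 y (by simp) ⟨hx, hy⟩
      cases K' with
      | nil =>
          have hJ : PySem.Chars.join ['\n'] ([x].map String.toList) = x.toList := by
            simp [PySem.Chars.join, List.intercalate]
          constructor
          · rw [hJ]; exact pv_nt_nl _ hxfree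
          · intro hx
            have hx' : x ≠ "" := by simpa using hx
            rw [hJ]
            cases hxl : x.toList with
            | nil => exact absurd (by simpa using hxl) hx'
            | cons c xs =>
                have hc : c ≠ '\n' := fun hcc => hxfree (hxl ▸ hcc ▸ List.mem_cons_self)
                have hxs : '\n' ∉ c :: xs := hxl ▸ hxfree
                simp only [pvNoTriple, Bool.and_eq_true]
                constructor
                · simp [hc]
                · exact pv_nt_nl _ hxs
      | cons y K'' =>
          have hJ : PySem.Chars.join ['\n'] ((x :: y :: K'').map String.toList)
              = x.toList ++ '\n' :: PySem.Chars.join ['\n'] ((y :: K'').map String.toList) := by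
            simp [PySem.Chars.join, List.intercalate]
          have h1 : pvNoTriple ('\n' :: PySem.Chars.join ['\n'] ((x :: y :: K'').map String.toList)) = true := by
            rw [hJ]
            by_cases hx : x = ""
            · have hxl : x.toList = [] := by simp [hx]
              rw [hxl, List.nil_append]
              exact ihh.2 (hhead hx (by simp))
            · cases hxl : x.toList with
              | nil => exact absurd (by simpa using hxl) hx
              | cons c xs =>
                  have hc : c ≠ '\n' := fun hcc => hxfree (hxl ▸ hcc ▸ List.mem_cons_self)
                  rw [List.cons_append, pv_nt_cons2 _ _ _ hc, ← List.cons_append, ← hxl,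
                    pv_nt_append _ _ hxfree]
                  exact ihh.1
          refine ⟨h1, ?_⟩
          intro hx
          have hx' : x ≠ "" := by simpa using hx
          rw [hJ] at h1 ⊢
          cases hxl : x.toList with
          | nil => exact absurd (by simpa using hxl) hx'
          | cons c xs =>
              have hc : c ≠ '\n' := fun hcc => hxfree (hxl ▸ hcc ▸ List.mem_cons_self)
              rw [hxl] at h1
              simp only [List.cons_append, pvNoTriple, Bool.and_eq_true] at h1 ⊢
              exact ⟨by simp [hc], h1⟩

theorem pv_splitOn_go_mem (c : Char) (fuel : Nat) (l cur : List Char) (acc : List (List Char))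
    (hf : l.length < fuel) (hacc : ∀ x ∈ acc, c ∉ x) (hcur : c ∉ cur) :
    ∀ x ∈ PySem.Chars.splitOn.go [c] fuel l cur acc, c ∉ x := by
  induction fuel generalizing l cur acc with
  | zero => exact absurd hf (by omega)
  | succ f ih =>
      cases l with
      | nil =>
          rw [PySem.Chars.splitOn.go.eq_def]
          intro x hx
          rw [List.mem_reverse] at hx
          rcases List.mem_cons.mp hx with h | h
          · subst h; simpa using hcur
          · exact hacc x h
      | cons d rest =>
          rw [PySem.Chars.splitOn.go.eq_def]
          show ∀ x ∈ (if List.isPrefixOf [c] (d :: rest) = true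
              then PySem.Chars.splitOn.go [c] f (List.drop (List.length [c]) (d :: rest)) []
                (cur.reverse :: acc)
              else PySem.Chars.splitOn.go [c] f rest (d :: cur) acc), c ∉ x
          by_cases hpre : List.isPrefixOf [c] (d :: rest) = true
          · rw [if_pos hpre]
            have hdrop : List.drop (List.length [c]) (d :: rest) = rest := rfl
            rw [hdrop]
            refine ih rest [] (cur.reverse :: acc) ?_ ?_ (by simp)
            · simp only [List.length_cons] at hf
              omega
            · intro x hx
              rcases List.mem_cons.mp hx with h | h
              · subst h; simpa using hcur
              · exact hacc x h
          · rw [if_neg hpre]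
            have hd : d ≠ c := by
              intro hdc
              exact hpre (by simp [List.isPrefixOf, hdc])
            refine ih rest (d :: cur) acc ?_ hacc ?_
            · simp only [List.length_cons] at hf; omega
            · intro hx
              rcases List.mem_cons.mp hx with h | h
              · exact hd h.symm
              · exact hcur h

theorem pv_while_id (f : Nat) (s : String) (h : PySem.Str.isIn "\n\n\n" s = false) :
    pvWhileA f s = s := by
  have h' : PySem.Chars.isIn ['\n', '\n', '\n'] s.toList = false := by simpa using h
  cases f <;> simp [pvWhileA, h']

theorem pv_strip_subset (c : Char) (u : List Char) (h : c ∈ PySem.Chars.strip u) : c ∈ u := by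
  rw [PySem.Chars.strip, PySem.Chars.rstrip, List.mem_reverse] at h
  have h2 := (List.dropWhile_sublist _).subset h
  rw [List.mem_reverse] at h2
  exact (List.dropWhile_sublist _).subset h2

theorem pv_lines_free (r : String) (z : String)
    (hz : z ∈ (PySem.Str.split? r "\n").getD []) : '\n' ∉ (PySem.Str.strip z).toList := by
  intro hmem
  rw [PySem.Str.toList_strip] at hmem
  have hz' : '\n' ∈ z.toList := pv_strip_subset _ _ hmem
  have hex : ∃ piece ∈ PySem.Chars.splitOn r.toList ['\n'], z = String.ofList piece := by
    simp only [PySem.Str.split?, PySem.Chars.split?,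
      show ("\n" : String).toList = ['\n'] from rfl] at hz
    simp at hz
    obtain ⟨piece, hp, he⟩ := hz
    exact ⟨piece, hp, he.symm⟩
  obtain ⟨piece, hp, rfl⟩ := hex
  rw [String.toList_ofList] at hz'
  have hfree := pv_splitOn_go_mem '\n' (r.toList.length + 1) r.toList [] []
    (by omega) (by simp) (by simp)
  exact hfree piece (by simpa [PySem.Chars.splitOn] using hp) hz'

theorem pv_joined_no_triple (M : List String) (hfree : ∀ x ∈ M, '\n' ∉ x.toList) :
    PySem.Str.isIn "\n\n\n" (PySem.Str.join "\n" (pvKeep "" M)) = false := by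
  have hK : ∀ x ∈ pvKeep "" M, '\n' ∉ x.toList := by
    intro x hx
    rcases pv_keep_mem M "" x hx with h | h
    · subst h; simp
    · exact hfree x h
  have hnt := (pv_nt_join (pvKeep "" M) hK (pv_keep_chain M "")).1
  have hnt' := pv_nt_tail _ _ hnt
  show PySem.Chars.isIn ("\n\n\n" : String).toList (PySem.Str.join "\n" (pvKeep "" M)).toList = false
  rw [PySem.Str.toList_join]
  rw [show ("\n\n\n" : String).toList = ['\n','\n','\n'] from rfl,
    show ("\n" : String).toList = ['\n'] from rfl]
  exact (PySem.Chars.isIn_eq_false_iff _ _).mpr (pv_nt_no_infix _ hnt')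

-- ===== VERDICT (by name: the statement is the Claim_ definition above) =====
theorem clean_response_formatting_py_spec : Claim_equal_clean_response_formatting_py := by
  intro response _
  unfold Spec_clean_response_formatting_py
  by_cases h0 : response = ""
  · simp [clean_response_formatting_py, clean_response_formatting_py_alt, h0]
  · simp only [clean_response_formatting_py, clean_response_formatting_py_alt, if_neg h0,
      List.foldl_cons, List.foldl_nil]
    have hfree : ∀ x ∈ ((PySem.Str.split? (PySem.Str.replace (PySem.Str.replace
        (PySem.Str.replace (PySem.Str.replace (PySem.Str.replace response "\\n" "\n")
        "**" "") "##" "") "###" "") "*" "") "\n").getD []).map PySem.Str.strip,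
        '\n' ∉ x.toList := by
      intro x hx
      obtain ⟨z, hz, rfl⟩ := List.mem_map.mp hx
      exact pv_lines_free _ z hz
    generalize hL : (PySem.Str.split? (PySem.Str.replace (PySem.Str.replace (PySem.Str.replace
      (PySem.Str.replace (PySem.Str.replace response "\\n" "\n") "**" "") "##" "")
      "###" "") "*" "") "\n").getD [] = L at hfree ⊢
    have hfold : L.foldl pvStepA [] = pvKeep "" (L.map PySem.Str.strip) := by
      have := pv_fold_eq L [] "" (by simp)
      simpa using this
    rw [hfold, pv_zip_eq, pv_while_id _ _ (pv_joined_no_triple _ hfree)]
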